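-- pv_equiv track=rewrite | github.com/zukadzm/GOA-homework | day 145/classwork/codewars/codewars.py | comfortable_word
-- ===== SOURCE A (Python) =====
-- def comfortable_word(word):
--     b = ''
--     for i in word:
--         if i in ('q', 'w', 'e', 'r', 't', 'a', 's', 'd', 'f', 'g', 'z', 'x', 'c', 'v', 'b'):
--             a = ('l')
--         else:
--             a = ('r')
--         if a == b:
--             return False
--         b = a
--     return True
-- ===== SOURCE B (Python) =====
-- def comfortable_word(word):
--     labels = ''.join('l' if c in 'qwertasdfgzxcvb' else 'r' for c in word)
--     if not labels:
--         return True
--     # the only comfortable label string of this length starts at labels[0] and alternates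
--     pattern = ('lr' if labels[0] == 'l' else 'rl') * len(labels)
--     return labels == pattern[:len(labels)]
-- ===== Notes on version B (the rewrite author's own statement) =====
-- stated objective: alternative
-- what changed: Instead of scanning with a carried previous-label state and early return, B builds the word's hand-label string and compares it for whole-string equality with the unique alternating pattern ('lr'/'rl' repeated) that a comfortable word of that length must have.
import Mathlib
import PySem

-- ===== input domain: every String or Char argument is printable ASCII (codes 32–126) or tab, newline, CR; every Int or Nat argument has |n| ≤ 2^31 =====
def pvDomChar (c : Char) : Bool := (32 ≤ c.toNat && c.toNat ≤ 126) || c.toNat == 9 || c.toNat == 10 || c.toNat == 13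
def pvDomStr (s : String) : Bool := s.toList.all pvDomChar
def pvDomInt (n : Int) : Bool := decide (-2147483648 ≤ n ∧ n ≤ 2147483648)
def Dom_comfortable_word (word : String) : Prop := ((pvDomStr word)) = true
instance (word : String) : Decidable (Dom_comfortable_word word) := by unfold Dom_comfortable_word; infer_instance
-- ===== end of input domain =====

-- B replaces A's stateful scan (carried previous label, early return) by building the
-- unique alternating label pattern of the word's length and one whole-string comparison.

-- ===== PORT A =====
-- the tuple membership test of A
def cwLeft (c : Char) : Bool :=
  c == 'q' || c == 'w' || c == 'e' || c == 'r' || c == 't' || c == 'a' || c == 's' ||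
  c == 'd' || c == 'f' || c == 'g' || c == 'z' || c == 'x' || c == 'c' || c == 'v' || c == 'b'

-- the for-loop with state b (previous label, '' initially); early return False → false
def cwLoopA (b : String) : List Char → Bool
  | [] => true
  | i :: rest =>
      let a : String := if cwLeft i then "l" else "r"
      if a == b then false else cwLoopA a rest

def comfortable_word (word : String) : Bool :=
  cwLoopA "" word.toList

-- ===== PORT B =====
-- 'l' if c in 'qwertasdfgzxcvb' else 'r'
def cwLabel (c : Char) : Char := if cwLeft c then 'l' else 'r'

def comfortable_word_alt (word : String) : Bool :=
  let labels := word.toList.map cwLabel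
  match labels with
  | [] => true                                   -- if not labels: return True
  | c :: _ =>
    -- ('lr' if labels[0] == 'l' else 'rl') * len(labels), then [:len(labels)]
    -- (the slice bound len(labels) is nonnegative and ≤ the pattern length, so it is List.take)
    let base : List Char := if c == 'l' then ['l', 'r'] else ['r', 'l']
    labels == ((List.replicate labels.length base).flatten.take labels.length)

-- ===== PRECONDITION & SPEC =====
def Spec_comfortable_word (word : String) (out : Bool) : Prop := out = comfortable_word_alt word
instance (word : String) (out : Bool) : Decidable (Spec_comfortable_word word out) := by unfold Spec_comfortable_word; infer_instance

-- ===== CLAIM (what is proved, stated in full; the proofs are below) =====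
def Claim_equal_comfortable_word : Prop := ∀ (word : String), Dom_comfortable_word word → Spec_comfortable_word word (comfortable_word word)

-- ===== LEMMAS AND PROOFS =====

def cwFlip (c : Char) : Char := if c == 'l' then 'r' else 'l'

-- the alternating pattern c, d, c, d, ... of length n
def cwPat (c d : Char) : Nat → List Char
  | 0 => []
  | n + 1 => c :: cwPat d c n

lemma cwPat_take (c d : Char) (n : Nat) : ∀ m, m ≤ 2 * n →
    (List.replicate n [c, d]).flatten.take m = cwPat c d m := by
  induction n with
  | zero => intro m hm; interval_cases m; rfl
  | succ k ih =>
    intro m hm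
    match m with
    | 0 => rfl
    | 1 => simp [List.replicate_succ, cwPat]
    | m + 2 =>
      simp only [List.replicate_succ, List.flatten_cons, List.cons_append, List.nil_append,
        List.take_succ_cons, cwPat]
      rw [ih m (by omega)]

-- the loop with previous label p ∈ {'l','r'} accepts exactly the alternating pattern starting at flip p
lemma cwLoopA_pat (cs : List Char) : ∀ (p : Char), p = 'l' ∨ p = 'r' →
    cwLoopA (String.ofList [p]) cs = (cs.map cwLabel == cwPat (cwFlip p) p cs.length) := by
  induction cs with
  | nil => intro p _; simp [cwLoopA, cwPat]
  | cons c rest ih =>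
    intro p hp
    rw [cwLoopA]
    rcases hp with hp | hp <;> subst hp <;> by_cases hc : cwLeft c
    · rw [show (if cwLeft c then ("l" : String) else "r") = String.ofList ['l'] by rw [if_pos hc]]
      rw [if_pos (by decide)]
      simp [cwPat, cwFlip, cwLabel, hc]
    · rw [show (if cwLeft c then ("l" : String) else "r") = String.ofList ['r'] by rw [if_neg hc]]
      rw [if_neg (by decide), ih 'r' (Or.inr rfl)]
      simp [cwPat, cwFlip, cwLabel, hc]
    · rw [show (if cwLeft c then ("l" : String) else "r") = String.ofList ['l'] by rw [if_pos hc]]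
      rw [if_neg (by decide), ih 'l' (Or.inl rfl)]
      simp [cwPat, cwFlip, cwLabel, hc]
    · rw [show (if cwLeft c then ("l" : String) else "r") = String.ofList ['r'] by rw [if_neg hc]]
      rw [if_pos (by decide)]
      simp [cwPat, cwFlip, cwLabel, hc]

-- ===== VERDICT (by name: the statement is the Claim_ definition above) =====
theorem comfortable_word_spec : Claim_equal_comfortable_word := by
  intro word _
  unfold Spec_comfortable_word comfortable_word comfortable_word_alt
  cases h : word.toList with
  | nil => simp [cwLoopA]
  | cons c rest =>
    simp only [List.map_cons]
    rw [cwLoopA]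
    by_cases hc : cwLeft c
    · rw [show (if cwLeft c then ("l" : String) else "r") = String.ofList ['l'] by rw [if_pos hc]]
      rw [if_neg (by decide), cwLoopA_pat rest 'l' (Or.inl rfl)]
      simp only [cwLabel, hc, if_true, List.length_cons, List.length_map]
      simp only [show (('l' : Char) == 'l') = true from rfl, if_true]
      rw [cwPat_take 'l' 'r' (rest.length + 1) (rest.length + 1) (by omega)]
      simp [cwPat, cwFlip]
    · rw [show (if cwLeft c then ("l" : String) else "r") = String.ofList ['r'] by rw [if_neg hc]]
      rw [if_neg (by decide), cwLoopA_pat rest 'r' (Or.inr rfl)]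
      simp only [cwLabel, hc, List.length_cons, List.length_map]
      simp only [show (('r' : Char) == 'l') = false from rfl, Bool.false_eq_true, if_false]
      rw [cwPat_take 'r' 'l' (rest.length + 1) (rest.length + 1) (by omega)]
      simp [cwPat, cwFlip]
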